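-- pv_equiv track=rewrite | github.com/juanathanwickston/TCM | db.py | adapt_query
-- ===== SOURCE A (Python) =====
-- def adapt_query(sql: str) -> str:
--     """
--     Convert SQLite-style '?' placeholders to psycopg2 '%s' placeholders,
--     but ONLY when the '?' is outside of:
--       - single-quoted strings: '...'
--       - double-quoted identifiers: "..."
--       - line comments: -- ...
--       - block comments: /* ... */
--     """
--     if not sql:
--         return sql
--
--     out = []
--     i = 0
--     n = len(sql)
--
--     in_single = False
--     in_double = False
--     in_line_comment = False
--     in_block_comment = False
--
--     while i < n:
--         ch = sql[i]
--
--         # End line comment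
--         if in_line_comment:
--             out.append(ch)
--             if ch == "\n":
--                 in_line_comment = False
--             i += 1
--             continue
--
--         # End block comment
--         if in_block_comment:
--             out.append(ch)
--             if ch == "*" and i + 1 < n and sql[i + 1] == "/":
--                 out.append("/")
--                 i += 2
--                 in_block_comment = False
--             else:
--                 i += 1
--             continue
--
--         # Start comments (only if not in quotes)
--         if not in_single and not in_double:
--             if ch == "-" and i + 1 < n and sql[i + 1] == "-":
--                 out.append(ch)
--                 out.append("-")
--                 i += 2
--                 in_line_comment = True
--                 continue
--             if ch == "/" and i + 1 < n and sql[i + 1] == "*":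
--                 out.append(ch)
--                 out.append("*")
--                 i += 2
--                 in_block_comment = True
--                 continue
--
--         # Handle quotes
--         if ch == "'" and not in_double:
--             out.append(ch)
--             if in_single:
--                 if i + 1 < n and sql[i + 1] == "'":
--                     out.append("'")
--                     i += 2
--                     continue
--                 in_single = False
--             else:
--                 in_single = True
--             i += 1
--             continue
--
--         if ch == '"' and not in_single:
--             out.append(ch)
--             if in_double:
--                 if i + 1 < n and sql[i + 1] == '"':
--                     out.append('"')
--                     i += 2
--                     continue
--                 in_double = False
--             else:
--                 in_double = True
--             i += 1
--             continue
--
--         # Replace placeholder only when not in quotes/comments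
--         if ch == "?" and not in_single and not in_double:
--             out.append("%s")
--             i += 1
--             continue
--
--         out.append(ch)
--         i += 1
--
--     return "".join(out)
-- ===== SOURCE B (Python) =====
-- def adapt_query(sql: str) -> str:
--     """Token-at-a-time rewrite: consume whole strings/identifiers/comments as
--     units, replace bare '?' with '%s'."""
--     out = []
--     i = 0
--     n = len(sql)
--     while i < n:
--         ch = sql[i]
--         if ch == "'" or ch == '"':
--             j = i + 1
--             while j < n:
--                 if sql[j] == ch:
--                     if j + 1 < n and sql[j + 1] == ch:
--                         j += 2
--                         continue
--                     j += 1
--                     break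
--                 j += 1
--             out.append(sql[i:j])
--             i = j
--         elif sql.startswith("--", i):
--             j = sql.find("\n", i + 2)
--             j = n if j == -1 else j + 1
--             out.append(sql[i:j])
--             i = j
--         elif sql.startswith("/*", i):
--             j = sql.find("*/", i + 2)
--             j = n if j == -1 else j + 2
--             out.append(sql[i:j])
--             i = j
--         elif ch == "?":
--             out.append("%s")
--             i += 1
--         else:
--             out.append(ch)
--             i += 1
--     return "".join(out)
-- ===== Notes on version B (the rewrite author's own statement) =====
-- stated objective: simpler
-- what changed: Replaced A's character-at-a-time scanner with four persistent mode flags (in_single/in_double/in_line_comment/in_block_comment) by a flag-free tokenizer that, at each top-level position, consumes a whole lexical unit at once (a quoted string or identifier via one inner scan, a line comment up to and including its ending newline, a block comment through its closing delimiter) and substitutes the psycopg2 placeholder for each bare question-mark character.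
import Mathlib
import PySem

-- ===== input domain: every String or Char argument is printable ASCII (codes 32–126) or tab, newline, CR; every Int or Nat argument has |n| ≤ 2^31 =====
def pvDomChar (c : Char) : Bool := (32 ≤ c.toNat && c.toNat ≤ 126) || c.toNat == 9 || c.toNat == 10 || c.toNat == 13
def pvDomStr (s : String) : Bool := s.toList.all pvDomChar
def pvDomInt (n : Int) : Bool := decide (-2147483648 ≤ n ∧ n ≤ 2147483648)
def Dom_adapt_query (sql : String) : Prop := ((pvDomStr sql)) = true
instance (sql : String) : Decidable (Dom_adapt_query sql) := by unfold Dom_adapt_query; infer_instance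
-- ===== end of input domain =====

-- B replaces A's four-flag character-at-a-time state machine by a tokenizer that
-- consumes each whole string/identifier/comment in one inner scan (objective: simpler).

-- ===== PORT A =====
-- literal transliteration of A's while-loop: index scan with four Bool flags; the loop
-- becomes recursion on the remaining characters (sql[i+1] lookahead = rest.head?)
def adaptA : List Char → Bool → Bool → Bool → Bool → List Char
  | [], _, _, _, _ => []
  | c :: rest, inS, inD, inL, inB =>
    if inL then
      c :: adaptA rest inS inD (if c = '\n' then false else inL) inB
    else if inB then
      if c = '*' ∧ rest.head? = some '/' then c :: '/' :: adaptA rest.tail inS inD inL false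
      else c :: adaptA rest inS inD inL inB
    else if (!inS ∧ !inD) ∧ c = '-' ∧ rest.head? = some '-' then
      c :: '-' :: adaptA rest.tail inS inD true inB
    else if (!inS ∧ !inD) ∧ c = '/' ∧ rest.head? = some '*' then
      c :: '*' :: adaptA rest.tail inS inD inL true
    else if c = '\'' ∧ !inD then
      if inS then
        if rest.head? = some '\'' then c :: '\'' :: adaptA rest.tail inS inD inL inB
        else c :: adaptA rest false inD inL inB
      else c :: adaptA rest true inD inL inB
    else if c = '"' ∧ !inS then
      if inD then
        if rest.head? = some '"' then c :: '"' :: adaptA rest.tail inS inD inL inB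
        else c :: adaptA rest inS false inL inB
      else c :: adaptA rest inS true inL inB
    else if c = '?' ∧ !inS ∧ !inD then
      '%' :: 's' :: adaptA rest inS inD inL inB
    else c :: adaptA rest inS inD inL inB
  termination_by l _ _ _ _ => l.length
  decreasing_by all_goals cases rest <;> simp

def adapt_query (sql : String) : String :=
  if sql = "" then sql
  else String.ofList (adaptA sql.toList false false false false)

-- ===== PORT B =====
-- B's inner quote scan: consume up to and including the closing quote ('' escapes)
def scanQ (q : Char) : List Char → List Char × List Char
  | [] => ([], [])
  | c :: rest =>
    if c = q then
      if rest.head? = some q then (c :: q :: (scanQ q rest.tail).1, (scanQ q rest.tail).2)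
      else ([c], rest)
    else (c :: (scanQ q rest).1, (scanQ q rest).2)
  termination_by l => l.length
  decreasing_by all_goals cases rest <;> simp

-- B's find("\n") + slice: consume through the first newline (or to the end)
def takeLine : List Char → List Char × List Char
  | [] => ([], [])
  | c :: rest =>
    if c = '\n' then ([c], rest)
    else (c :: (takeLine rest).1, (takeLine rest).2)

-- B's find("*/") + slice: consume through the first "*/" (or to the end)
def takeBlock : List Char → List Char × List Char
  | [] => ([], [])
  | c :: rest =>
    if c = '*' ∧ rest.head? = some '/' then ([c, '/'], rest.tail)
    else (c :: (takeBlock rest).1, (takeBlock rest).2)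

theorem scanQ_len (q : Char) (l : List Char) : (scanQ q l).2.length ≤ l.length := by
  fun_induction scanQ q l <;> simp_all <;> omega

theorem takeLine_len (l : List Char) : (takeLine l).2.length ≤ l.length := by
  fun_induction takeLine l <;> simp_all
  omega

theorem takeBlock_len (l : List Char) : (takeBlock l).2.length ≤ l.length := by
  fun_induction takeBlock l <;> simp_all <;> omega

def adaptB : List Char → List Char
  | [] => []
  | c :: rest =>
    if c = '\'' ∨ c = '"' then
      c :: ((scanQ c rest).1 ++ adaptB (scanQ c rest).2)
    else if c = '-' ∧ rest.head? = some '-' then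
      c :: '-' :: ((takeLine rest.tail).1 ++ adaptB (takeLine rest.tail).2)
    else if c = '/' ∧ rest.head? = some '*' then
      c :: '*' :: ((takeBlock rest.tail).1 ++ adaptB (takeBlock rest.tail).2)
    else if c = '?' then
      '%' :: 's' :: adaptB rest
    else c :: adaptB rest
  termination_by l => l.length
  decreasing_by
    · have := scanQ_len c rest; simp; omega
    · have h1 := takeLine_len rest.tail
      have h2 : rest.tail.length ≤ rest.length := by cases rest <;> simp
      simp; omega
    · have h1 := takeBlock_len rest.tail
      have h2 : rest.tail.length ≤ rest.length := by cases rest <;> simp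
      simp; omega
    · simp
    · simp

def adapt_query_alt (sql : String) : String :=
  String.ofList (adaptB sql.toList)

-- ===== PRECONDITION & SPEC =====
def Spec_adapt_query (sql : String) (out : String) : Prop := out = adapt_query_alt sql
instance (sql : String) (out : String) : Decidable (Spec_adapt_query sql out) := by unfold Spec_adapt_query; infer_instance

-- ===== CLAIM (what is proved, stated in full; the proofs are below) =====
def Claim_equal_adapt_query : Prop := ∀ (sql : String), Dom_adapt_query sql → Spec_adapt_query sql (adapt_query sql)

-- ===== LEMMAS AND PROOFS =====

theorem adaptA_single (l : List Char) :
    adaptA l true false false false =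
      (scanQ '\'' l).1 ++ adaptA (scanQ '\'' l).2 false false false false := by
  fun_induction scanQ '\'' l <;> simp_all [adaptA]

theorem adaptA_double (l : List Char) :
    adaptA l false true false false =
      (scanQ '"' l).1 ++ adaptA (scanQ '"' l).2 false false false false := by
  fun_induction scanQ '"' l <;> simp_all [adaptA]

theorem adaptA_line (l : List Char) :
    adaptA l false false true false =
      (takeLine l).1 ++ adaptA (takeLine l).2 false false false false := by
  fun_induction takeLine l <;> simp_all [adaptA]

theorem adaptA_block (l : List Char) :
    adaptA l false false false true =
      (takeBlock l).1 ++ adaptA (takeBlock l).2 false false false false := by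
  fun_induction takeBlock l <;> simp_all [adaptA]

theorem adaptA_eq_adaptB (l : List Char) : adaptA l false false false false = adaptB l := by
  fun_induction adaptB l with
  | case1 => simp [adaptA]
  | case2 c rest h ih =>
    rcases h with h | h <;> subst h <;>
      simp_all [adaptA, adaptA_single, adaptA_double]
  | case3 c rest h1 h ih =>
    obtain ⟨hc, hh⟩ := h; subst hc
    simp_all [adaptA, adaptA_line]
  | case4 c rest h1 h2 h ih =>
    obtain ⟨hc, hh⟩ := h; subst hc
    simp_all [adaptA, adaptA_block]
  | _ =>
    simp_all [adaptA] <;> split_ifs <;> simp_all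

-- ===== VERDICT (by name: the statement is the Claim_ definition above) =====
theorem adapt_query_spec : Claim_equal_adapt_query := by
  intro sql _
  unfold Spec_adapt_query adapt_query adapt_query_alt
  by_cases h : sql = ""
  · subst h; simp [adaptB]
  · simp [h, adaptA_eq_adaptB]
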